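-- pv_equiv track=rewrite | github.com/wang10517/Algorithms | programming_books/algorithm_design_manual/chapter1/valify_tickets.py | validify_tickets
-- ===== SOURCE A (Python) =====
-- from itertools import combinations
--
-- def validify_tickets(tickets, n, k, l):
--     """
--         tickets: a set of stickets to be validified
--         n : the list of numbers narrowed down
--         k : the number of slots in each ticket
--         l : the minimum number of tickets required to win a prize
--     """
--     all_sets = combinations(n, k)
--     for s in all_sets:
--         found = False
--         for ticket in tickets:
--             if len(set(ticket).intersection(s)) >= l:
--                 found = True
--                 break
--         if not found:
--             return False
--     return True
-- ===== SOURCE B (Python) =====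
-- def validify_tickets(tickets, n, k, l):
--     """Pruned depth-first search for a k-combination of n that no ticket
--     shares >= l elements with; True iff no such combination exists."""
--     tsets = [frozenset(t) for t in tickets]
--     items = list(n)
--
--     def uncovered(i, r, chosen):
--         # some ticket already shares >= l elements with chosen: every
--         # completion of chosen is covered, so prune this whole branch
--         if any(len(ts & chosen) >= l for ts in tsets):
--             return False
--         if r == 0:
--             return True  # chosen completes an uncovered combination
--         while len(items) - i >= r:
--             if uncovered(i + 1, r - 1, chosen | {items[i]}):
--                 return True
--             i += 1
--         return False
--
--     return not uncovered(0, k, frozenset())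
-- ===== Notes on version B (the rewrite author's own statement) =====
-- stated objective: alternative
-- what changed: A enumerates every k-combination via itertools and scans tickets per combination; B runs a pruned depth-first search for an uncovered combination, cutting off a whole subtree as soon as the partial choice already shares >= l elements with some ticket, and returns the negation.
import Mathlib
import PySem

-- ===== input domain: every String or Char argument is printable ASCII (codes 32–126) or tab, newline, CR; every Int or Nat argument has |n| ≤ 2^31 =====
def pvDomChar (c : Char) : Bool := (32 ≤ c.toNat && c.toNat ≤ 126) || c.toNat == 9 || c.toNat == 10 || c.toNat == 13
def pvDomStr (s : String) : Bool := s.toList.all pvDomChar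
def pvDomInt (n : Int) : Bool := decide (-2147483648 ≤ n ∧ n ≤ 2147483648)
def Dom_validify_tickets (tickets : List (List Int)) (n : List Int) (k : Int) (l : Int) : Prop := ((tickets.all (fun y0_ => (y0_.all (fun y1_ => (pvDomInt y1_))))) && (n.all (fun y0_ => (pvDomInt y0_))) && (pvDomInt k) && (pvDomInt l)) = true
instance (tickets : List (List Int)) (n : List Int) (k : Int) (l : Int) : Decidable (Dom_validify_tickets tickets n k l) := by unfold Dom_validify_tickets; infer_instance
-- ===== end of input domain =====

-- B replaces A's exhaustive itertools enumeration by a pruned depth-first search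
-- for an uncovered combination (objective: alternative algorithm, same worst case).

-- ===== PORT A =====
-- itertools.combinations(xs, r) in index order (each combination as a list)
def pvCombos (xs : List Int) (r : Nat) : List (List Int) :=
  match r, xs with
  | 0, _ => [[]]
  | _ + 1, [] => []
  | r' + 1, x :: xs' => (pvCombos xs' r').map (fun c => x :: c) ++ pvCombos xs' (r' + 1)

-- inner 'for ticket in tickets: … break' loop with the 'found' flag
def pvFindTicket (tickets : List (List Int)) (l : Int) (s : List Int) : Bool :=
  match tickets with
  | [] => false
  | t :: rest =>
      if (((PySem.Set.inter (PySem.Set.ofList t) s).length : Int) ≥ l) then true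
      else pvFindTicket rest l s

-- outer 'for s in all_sets' loop with the early 'return False'
def pvALoop (tickets : List (List Int)) (l : Int) : List (List Int) → Bool
  | [] => true
  | s :: rest =>
      let found := pvFindTicket tickets l s
      if !found then false else pvALoop tickets l rest

-- k.toNat: combinations(n, k) raises ValueError for k < 0 (excluded by Pre_)
def validify_tickets (tickets : List (List Int)) (n : List Int) (k : Int) (l : Int) : Bool :=
  pvALoop tickets l (pvCombos n k.toNat)

-- ===== PORT B =====
-- 'any(len(ts & chosen) >= l for ts in tsets)'
def pvCovered (tsets : List (PySem.Set Int)) (l : Int) (chosen : PySem.Set Int) : Bool :=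
  tsets.any (fun ts => (((PySem.Set.inter ts chosen).length : Int) ≥ l))

mutual
  -- the recursive 'uncovered(i, r, chosen)' (the index i becomes the suffix 'rest')
  def pvUncov (tsets : List (PySem.Set Int)) (l : Int) (rest : List Int) (r : Int)
      (chosen : PySem.Set Int) : Bool :=
    if pvCovered tsets l chosen then false
    else if r = 0 then true
    else pvScan tsets l rest r chosen
  -- the 'while len(items) - i >= r' loop scanning the next element to take
  def pvScan (tsets : List (PySem.Set Int)) (l : Int) (rest : List Int) (r : Int)
      (chosen : PySem.Set Int) : Bool :=
    if (rest.length : Int) ≥ r then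
      match rest with
      | [] => false -- Python: items[i] raises IndexError; reachable only when r < 0, i.e. outside Pre_
      | x :: xs =>
          if pvUncov tsets l xs (r - 1) (PySem.Set.union chosen [x]) then true
          else pvScan tsets l xs r chosen
    else false
end

def validify_tickets_alt (tickets : List (List Int)) (n : List Int) (k : Int) (l : Int) : Bool :=
  !(pvUncov (tickets.map (fun t => PySem.Set.ofList t)) l n k PySem.Set.empty)

-- ===== PRECONDITION & SPEC =====
-- Pre_ excludes k < 0, on which A's combinations(n, k) raises ValueError.
def Pre_validify_tickets (tickets : List (List Int)) (n : List Int) (k : Int) (l : Int) : Prop :=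
  0 ≤ k
instance (tickets : List (List Int)) (n : List Int) (k : Int) (l : Int) : Decidable (Pre_validify_tickets tickets n k l) := by unfold Pre_validify_tickets; infer_instance

def pvWitness_validify_tickets : List (List Int) × List Int × Int × Int := ([[1, 2]], [1, 2, 3], 2, 1)

def Spec_validify_tickets (tickets : List (List Int)) (n : List Int) (k : Int) (l : Int) (out : Bool) : Prop := out = validify_tickets_alt tickets n k l
instance (tickets : List (List Int)) (n : List Int) (k : Int) (l : Int) (out : Bool) : Decidable (Spec_validify_tickets tickets n k l out) := by unfold Spec_validify_tickets; infer_instance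

-- ===== CLAIM (what is proved, stated in full; the proofs are below) =====
def Claim_equal_validify_tickets : Prop := ∀ (tickets : List (List Int)) (n : List Int) (k : Int) (l : Int), Dom_validify_tickets tickets n k l → Pre_validify_tickets tickets n k l → Spec_validify_tickets tickets n k l (validify_tickets tickets n k l)

-- ===== LEMMAS AND PROOFS =====

theorem pvCombos_eq_nil_of_lt (xs : List Int) (r : Nat) (h : xs.length < r) :
    pvCombos xs r = [] := by
  induction xs generalizing r with
  | nil =>
      cases r with
      | zero => simp at h
      | succ r' => rfl
  | cons x xs ih =>
      cases r with
      | zero => simp at h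
      | succ r' =>
          simp only [pvCombos]
          rw [ih r' (by simpa using h), ih (r' + 1) (by simpa using Nat.lt_succ_of_lt h)]
          rfl

-- pvFindTicket as an 'any'
theorem pvFindTicket_eq_any (tickets : List (List Int)) (l : Int) (s : List Int) :
    pvFindTicket tickets l s
      = tickets.any (fun t => (((PySem.Set.inter (PySem.Set.ofList t) s).length : Int) ≥ l)) := by
  induction tickets with
  | nil => rfl
  | cons t rest ih =>
      simp only [pvFindTicket, List.any_cons]
      split_ifs with h <;> simp [h, ih]

-- pvALoop as an 'all'
theorem pvALoop_eq_all (tickets : List (List Int)) (l : Int) (cs : List (List Int)) :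
    pvALoop tickets l cs = cs.all (fun s => pvFindTicket tickets l s) := by
  induction cs with
  | nil => rfl
  | cons s rest ih =>
      simp only [pvALoop, List.all_cons]
      cases h : pvFindTicket tickets l s <;> simp [h, ih]

-- B's covered over the precomputed ticket sets equals A's inner loop
theorem pvCovered_map (tickets : List (List Int)) (l : Int) (s : List Int) :
    pvCovered (tickets.map (fun t => PySem.Set.ofList t)) l s = pvFindTicket tickets l s := by
  rw [pvFindTicket_eq_any, pvCovered, List.any_map]
  rfl

-- the intersection length only depends on the second argument's membership
theorem inter_congr (w : List Int) (s₁ s₂ : List Int) (h : ∀ x, x ∈ s₁ ↔ x ∈ s₂) :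
    PySem.Set.inter w s₁ = PySem.Set.inter w s₂ := by
  unfold PySem.Set.inter
  apply List.filter_congr
  intro x _
  simp [h x]

theorem pvCovered_congr (tsets : List (PySem.Set Int)) (l : Int) (s₁ s₂ : List Int)
    (h : ∀ x, x ∈ s₁ ↔ x ∈ s₂) : pvCovered tsets l s₁ = pvCovered tsets l s₂ := by
  unfold pvCovered
  exact List.any_congr rfl (fun ts => by rw [inter_congr ts s₁ s₂ h])

-- covered is monotone in the chosen set
theorem pvCovered_mono (tsets : List (PySem.Set Int)) (l : Int) (s₁ s₂ : List Int)
    (h : ∀ x, x ∈ s₁ → x ∈ s₂) (hc : pvCovered tsets l s₁ = true) :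
    pvCovered tsets l s₂ = true := by
  rw [pvCovered, List.any_eq_true] at hc ⊢
  obtain ⟨ts, hts, hlen⟩ := hc
  refine ⟨ts, hts, ?_⟩
  simp only [decide_eq_true_eq, ge_iff_le] at hlen ⊢
  refine le_trans hlen ?_
  have hsub : (PySem.Set.inter ts s₁).Sublist (PySem.Set.inter ts s₂) := by
    unfold PySem.Set.inter
    apply List.monotone_filter_right
    intro a ha
    simp only [PySem.Set.contains_eq_listContains, List.contains_iff_mem] at ha ⊢
    exact h a ha
  exact_mod_cast hsub.length_le

-- the main invariant: pvUncov searches exactly for an uncovered completion,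
-- pvScan is its choice loop (proved together by induction on the suffix length)
theorem pvUncov_scan_eq (tsets : List (PySem.Set Int)) (l : Int) :
    ∀ (m : Nat) (rest : List Int), rest.length ≤ m → ∀ (r : Int) (chosen : List Int),
      (1 ≤ r → pvScan tsets l rest r chosen
          = (pvCombos rest r.toNat).any (fun c => !pvCovered tsets l (chosen ++ c))) ∧
      (0 ≤ r → pvUncov tsets l rest r chosen
          = (pvCombos rest r.toNat).any (fun c => !pvCovered tsets l (chosen ++ c))) := by
  intro m
  induction m with
  | zero =>
      intro rest hlen r chosen
      have hrest : rest = [] := List.length_eq_zero_iff.mp (Nat.le_zero.mp hlen)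
      subst hrest
      constructor
      · intro hr
        rw [pvScan]
        have hg : ¬ (((([] : List Int).length : Int)) ≥ r) := by simp; omega
        rw [if_neg hg]
        have : r.toNat = r.toNat - 1 + 1 := by omega
        rw [this]
        rfl
      · intro hr
        rw [pvUncov]
        by_cases hc : pvCovered tsets l chosen = true
        · rw [if_pos hc]
          by_cases hr0 : r = 0
          · subst hr0
            simp only [Int.toNat_zero, pvCombos, List.any_cons, List.any_nil, List.append_nil,
              Bool.or_false, hc, Bool.not_true]
          · have : r.toNat = r.toNat - 1 + 1 := by omega
            rw [this]
            rfl
        · rw [if_neg hc]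
          by_cases hr0 : r = 0
          · subst hr0
            simp only [Int.toNat_zero, pvCombos, List.any_cons, List.any_nil,
              List.append_nil, Bool.or_false]
            simp [Bool.not_eq_true] at hc
            simp [hc]
          · rw [if_neg hr0, pvScan]
            have hg : ¬ (((([] : List Int).length : Int)) ≥ r) := by simp; omega
            rw [if_neg hg]
            have : r.toNat = r.toNat - 1 + 1 := by omega
            rw [this]
            rfl
  | succ m ih =>
      intro rest hlen r chosen
      have hscan : 1 ≤ r → pvScan tsets l rest r chosen
          = (pvCombos rest r.toNat).any (fun c => !pvCovered tsets l (chosen ++ c)) := by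
        intro hr
        cases rest with
        | nil =>
            rw [pvScan]
            have hg : ¬ (((([] : List Int).length : Int)) ≥ r) := by simp; omega
            rw [if_neg hg]
            have : r.toNat = r.toNat - 1 + 1 := by omega
            rw [this]
            rfl
        | cons x xs =>
            have hxs : xs.length ≤ m := by simp at hlen; omega
            rw [pvScan]
            by_cases hg : (((x :: xs).length : Int)) ≥ r
            · rw [if_pos hg]
              have h1 := (ih xs hxs (r - 1) (PySem.Set.union chosen [x])).2 (by omega)
              have h2 := (ih xs hxs r chosen).1 hr
              have hAM : pvUncov tsets l xs (r - 1) (PySem.Set.union chosen [x])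
                  = (pvCombos xs (r - 1).toNat).any (fun c => !pvCovered tsets l (chosen ++ x :: c)) := by
                rw [h1]
                exact List.any_congr rfl (fun c => by
                  rw [pvCovered_congr tsets l (PySem.Set.union chosen [x] ++ c) (chosen ++ x :: c)
                    (by intro y; simp [PySem.Set.mem_union]; tauto)])
              have hksplit : r.toNat = (r - 1).toNat + 1 := by omega
              have hcomb : pvCombos (x :: xs) r.toNat
                  = (pvCombos xs (r - 1).toNat).map (fun c => x :: c) ++ pvCombos xs r.toNat := by
                conv_lhs => rw [hksplit]
                conv_rhs => rw [hksplit]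
                rfl
              rw [hcomb, List.any_append, List.any_map]
              have hcomp : ((fun c => !pvCovered tsets l (chosen ++ c)) ∘ (fun c => x :: c))
                  = (fun c => !pvCovered tsets l (chosen ++ x :: c)) := rfl
              rw [hcomp, hAM, h2]
              cases hA : (pvCombos xs (r - 1).toNat).any (fun c => !pvCovered tsets l (chosen ++ x :: c)) <;>
                simp
            · rw [if_neg hg]
              have hnil : pvCombos (x :: xs) r.toNat = [] := by
                apply pvCombos_eq_nil_of_lt
                simp only [List.length_cons, ge_iff_le, not_le] at hg ⊢
                omega
              rw [hnil]
              rfl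
      constructor
      · exact hscan
      · intro hr
        rw [pvUncov]
        by_cases hc : pvCovered tsets l chosen = true
        · rw [if_pos hc]
          symm
          rw [List.any_eq_false]
          intro c _
          have : pvCovered tsets l (chosen ++ c) = true :=
            pvCovered_mono tsets l chosen (chosen ++ c) (fun x hx => List.mem_append_left c hx) hc
          simp [this]
        · rw [if_neg hc]
          by_cases hr0 : r = 0
          · subst hr0
            simp only [Int.toNat_zero, pvCombos, List.any_cons, List.any_nil,
              List.append_nil, Bool.or_false]
            simp [Bool.not_eq_true] at hc
            simp [hc]
          · rw [if_neg hr0]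
            exact hscan (by omega)

-- ===== VERDICT (by name: the statement is the Claim_ definition above) =====
theorem validify_tickets_spec : Claim_equal_validify_tickets := by
  intro tickets n k l _ hpre
  unfold Spec_validify_tickets validify_tickets validify_tickets_alt
  have hmain := (pvUncov_scan_eq (tickets.map (fun t => PySem.Set.ofList t)) l n.length n le_rfl k PySem.Set.empty).2 hpre
  rw [hmain, pvALoop_eq_all, List.all_eq_not_any_not]
  congr 1
  exact List.any_congr rfl (fun c => by rw [show (PySem.Set.empty ++ c : List Int) = c from rfl, pvCovered_map])
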